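-- pv_equiv track=rewrite | github.com/JaviOHS/calc-matrix | utils/formating/input_formating.py | format_operators
-- ===== SOURCE A (Python) =====
-- from typing import List, Tuple
--
-- def format_operators(text: str, protected_regions: List[Tuple[int, int]]) -> str:
--     """Formatea los operadores añadiendo espacios"""
--     def is_protected(pos):
--         return any(start <= pos < end for start, end in protected_regions)
--
--     result = []
--     i = 0
--     while i < len(text):
--         char = text[i]
--
--         if i > 0 and char in '+-·/=,' and not is_protected(i):
--             if result and result[-1] != ' ':
--                 result.append(' ')
--             result.append(char)
--             if i + 1 < len(text) and text[i + 1] != ' ':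
--                 result.append(' ')
--         else:
--             result.append(char)
--         i += 1
--
--     return ''.join(result)
-- ===== SOURCE B (Python) =====
-- def format_operators(text, protected_regions):
--     """Formatea los operadores añadiendo espacios"""
--     n = len(text)
--     # difference array: prefix sums count the regions covering each position
--     diff = [0] * (n + 1)
--     for start, end in protected_regions:
--         s = max(start, 0)
--         e = min(end, n)
--         if s < e:
--             diff[s] += 1
--             diff[e] -= 1
--     out = []
--     prev = None  # last character appended to out
--     acc = 0
--     for i, ch in enumerate(text):
--         acc += diff[i]
--         if i > 0 and ch in '+-·/=,' and acc == 0: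
--             if prev is not None and prev != ' ':
--                 out.append(' ')
--             out.append(ch)
--             if i + 1 < n and text[i + 1] != ' ':
--                 out.append(' ')
--                 prev = ' '
--             else:
--                 prev = ch
--         else:
--             out.append(ch)
--             prev = ch
--     return ''.join(out)
-- ===== Notes on version B (the rewrite author's own statement) =====
-- stated objective: faster
-- what changed: B replaces A's per-character rescan of protected_regions (any() inside the loop) by a difference array built once from the regions and summed left-to-right, and tracks the last emitted character in a variable instead of re-reading the output buffer.
import Mathlib
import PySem

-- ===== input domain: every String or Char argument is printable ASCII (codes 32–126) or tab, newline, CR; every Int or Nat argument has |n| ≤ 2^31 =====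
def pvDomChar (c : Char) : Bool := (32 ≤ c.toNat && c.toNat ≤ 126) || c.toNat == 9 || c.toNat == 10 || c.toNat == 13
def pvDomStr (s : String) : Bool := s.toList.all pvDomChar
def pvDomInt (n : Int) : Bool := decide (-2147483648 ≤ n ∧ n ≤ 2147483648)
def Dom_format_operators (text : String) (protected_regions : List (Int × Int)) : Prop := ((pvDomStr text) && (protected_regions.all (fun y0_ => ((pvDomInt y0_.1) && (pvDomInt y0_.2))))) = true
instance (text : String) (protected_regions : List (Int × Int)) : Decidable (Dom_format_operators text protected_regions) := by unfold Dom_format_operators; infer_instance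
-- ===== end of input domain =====

-- B replaces A's per-character rescan of protected_regions by a difference array
-- summed once left-to-right, and tracks the last emitted character instead of
-- re-reading the output buffer (objective: faster, O(n+m) instead of O(n·m)).

-- ===== PORT A =====
-- the operator characters '+-·/=,'
def foOps : List Char := ['+', '-', '·', '/', '=', ',']

-- A's nested is_protected: rescans all regions for each position
def foIsProt (regions : List (Int × Int)) (pos : Int) : Bool :=
  regions.any (fun se => decide (se.1 ≤ pos) && decide (pos < se.2))

-- A's while-loop, one recursive call per index, `result` is the output buffer
def foLoopA (tl : List Char) (regions : List (Int × Int)) (i : Nat)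
    (result : List Char) : List Char :=
  if h : i < tl.length then
    let char := tl.getD i ' '
    let result' :=
      if decide (0 < i) && foOps.contains char && !foIsProt regions (i : Int) then
        let r1 := if !result.isEmpty && !(result.getLast? == some ' ') then result ++ [' '] else result
        let r2 := r1 ++ [char]
        if decide (i + 1 < tl.length) && !(tl.getD (i + 1) ' ' == ' ') then r2 ++ [' '] else r2
      else result ++ [char]
    foLoopA tl regions (i + 1) result'
  else result
termination_by tl.length - i

def format_operators (text : String) (protected_regions : List (Int × Int)) : String :=
  String.mk (foLoopA text.toList protected_regions 0 [])

-- ===== PORT B =====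
-- one region's two updates to the difference array (clamped to [0, n])
def foApplyRegion (n : Nat) (diff : List Int) (r : Int × Int) : List Int :=
  let s := max r.1 0
  let e := min r.2 (n : Int)
  if s < e then
    let d1 := diff.set s.toNat (diff.getD s.toNat 0 + 1)
    d1.set e.toNat (d1.getD e.toNat 0 - 1)
  else diff

-- the operator characters '+-·/=,' (B's own copy)
def foOpsB : List Char := ['+', '-', '·', '/', '=', ',']

-- B's for-loop over enumerate(text): running sum `acc` of the difference
-- array (= number of regions covering i), `prev` = last appended character
def foLoopB (tl : List Char) (diff : List Int) (i : Nat)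
    (out : List Char) (prev : Option Char) (acc : Int) : List Char :=
  if h : i < tl.length then
    let ch := tl.getD i ' '
    let acc' := acc + diff.getD i 0
    if decide (0 < i) && foOpsB.contains ch && decide (acc' = 0) then
      let out1 := if !(prev == none) && !(prev == some ' ') then out ++ [' '] else out
      let out2 := out1 ++ [ch]
      if decide (i + 1 < tl.length) && !(tl.getD (i + 1) ' ' == ' ') then
        foLoopB tl diff (i + 1) (out2 ++ [' ']) (some ' ') acc'
      else
        foLoopB tl diff (i + 1) out2 (some ch) acc'
    else
      foLoopB tl diff (i + 1) (out ++ [ch]) (some ch) acc'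
  else out
termination_by tl.length - i

def format_operators_alt (text : String) (protected_regions : List (Int × Int)) : String :=
  let tl := text.toList
  let n := tl.length
  let diff := protected_regions.foldl (foApplyRegion n) (List.replicate (n + 1) 0)
  String.mk (foLoopB tl diff 0 [] none 0)

-- ===== PRECONDITION & SPEC =====
def Spec_format_operators (text : String) (protected_regions : List (Int × Int)) (out : String) : Prop := out = format_operators_alt text protected_regions
instance (text : String) (protected_regions : List (Int × Int)) (out : String) : Decidable (Spec_format_operators text protected_regions out) := by unfold Spec_format_operators; infer_instance

-- ===== CLAIM (what is proved, stated in full; the proofs are below) =====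
def Claim_equal_format_operators : Prop := ∀ (text : String) (protected_regions : List (Int × Int)), Dom_format_operators text protected_regions → Spec_format_operators text protected_regions (format_operators text protected_regions)

-- ===== LEMMAS AND PROOFS =====

-- the predicate "region se covers position i"
def foCov (i : Nat) (se : Int × Int) : Bool := decide (se.1 ≤ (i : Int)) && decide ((i : Int) < se.2)

lemma sum_take_set (l : List Int) (k : Nat) (v : Int) (m : Nat) (hk : k < l.length) :
    ((l.set k v).take m).sum = (l.take m).sum + (if k < m then v - l.getD k 0 else 0) := by
  induction l generalizing k m with
  | nil => simp at hk
  | cons a l ih =>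
    cases k with
    | zero =>
      cases m with
      | zero => simp
      | succ m => simp [List.getD]; ring
    | succ k =>
      cases m with
      | zero => simp
      | succ m =>
        have hk' : k < l.length := by simpa using hk
        simp only [List.set_cons_succ, List.take_succ_cons, List.sum_cons, List.getD_cons_succ,
          ih k m hk']
        by_cases hkm : k < m <;> simp [hkm, Nat.succ_lt_succ_iff] <;> ring

lemma applyRegion_length (n : Nat) (diff : List Int) (r : Int × Int) :
    (foApplyRegion n diff r).length = diff.length := by
  unfold foApplyRegion; dsimp only; split_ifs <;> simp

lemma foldl_applyRegion_length (n : Nat) (regions : List (Int × Int)) (init : List Int) :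
    (regions.foldl (foApplyRegion n) init).length = init.length := by
  induction regions generalizing init with
  | nil => rfl
  | cons r rs ih => simp [List.foldl_cons, ih, applyRegion_length]

lemma applyRegion_sum (n i : Nat) (hi : i < n) (init : List Int) (hlen : init.length = n + 1)
    (r : Int × Int) :
    ((foApplyRegion n init r).take (i + 1)).sum
      = (init.take (i + 1)).sum + (if foCov i r then 1 else 0) := by
  unfold foApplyRegion
  dsimp only
  set s := max r.1 0 with hs
  set e := min r.2 (n : Int) with he
  have hs0 : (0 : Int) ≤ s := le_max_right _ _
  have hen : e ≤ (n : Int) := min_le_right _ _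
  by_cases hse : s < e
  · rw [if_pos hse]
    have hsnat : s.toNat < init.length := by rw [hlen]; omega
    have henat : e.toNat < init.length := by rw [hlen]; omega
    have hd1len : (init.set s.toNat (init.getD s.toNat 0 + 1)).length = init.length := by simp
    rw [sum_take_set _ _ _ _ (by rw [hd1len]; exact henat),
        sum_take_set _ _ _ _ hsnat]
    have h1 : (s.toNat < i + 1) ↔ (r.1 ≤ (i : Int)) := by
      rcases le_total r.1 0 with h | h
      · rw [hs, max_eq_right h]; omega
      · rw [hs, max_eq_left h]; omega
    have h2 : (e.toNat < i + 1) ↔ ¬ ((i : Int) < r.2) := by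
      rcases le_total r.2 (n : Int) with h | h
      · rw [he, min_eq_left h]; omega
      · rw [he, min_eq_right h]; omega
    by_cases ha : r.1 ≤ (i : Int) <;> by_cases hb : (i : Int) < r.2 <;>
      simp [foCov, ha, hb, h1, h2]
    all_goals (first | ring | omega)
  · rw [if_neg hse]
    have hcov : foCov i r = false := by
      simp only [foCov, Bool.and_eq_false_iff, decide_eq_false_iff_not, not_le, not_lt]
      by_cases ha : r.1 ≤ (i : Int)
      · right
        have hsi : s ≤ (i : Int) := by rw [hs]; exact max_le ha (by omega)
        by_contra hb
        push_neg at hb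
        have : (i : Int) < e := by rw [he]; exact lt_min hb (by omega)
        omega
      · left; omega
    simp [hcov]

lemma diff_prefix (n i : Nat) (hi : i < n) (regions : List (Int × Int)) (init : List Int)
    (hlen : init.length = n + 1) :
    ((regions.foldl (foApplyRegion n) init).take (i + 1)).sum
      = (init.take (i + 1)).sum + ((regions.filter (foCov i)).length : Int) := by
  induction regions generalizing init with
  | nil => simp
  | cons r rs ih =>
    rw [List.foldl_cons, ih _ (by rw [applyRegion_length, hlen]),
        applyRegion_sum n i hi init hlen r, List.filter_cons]
    split_ifs <;> simp <;> push_cast <;> ring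

lemma sum_take_succ (l : List Int) (i : Nat) (hi : i < l.length) :
    (l.take (i + 1)).sum = (l.take i).sum + l.getD i 0 := by
  rw [List.take_add_one, List.sum_append]
  simp [List.getElem?_eq_getElem hi, List.getD]

lemma count_zero_iff_not_prot (regions : List (Int × Int)) (i : Nat) :
    (((regions.filter (foCov i)).length : Int) = 0) ↔ foIsProt regions (i : Int) = false := by
  rw [Int.natCast_eq_zero, List.length_eq_zero_iff, List.filter_eq_nil_iff]
  unfold foIsProt
  simp [foCov, List.any_eq_true]

lemma getLast?_none_isEmpty (l : List Char) : (l.getLast? == none) = l.isEmpty := by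
  cases h : l.getLast? with
  | none => rw [List.getLast?_eq_none_iff] at h; simp [h]
  | some a =>
    have : l ≠ [] := by intro hl; subst hl; simp at h
    simp [List.isEmpty_eq_false_iff.mpr this]

lemma loop_eq (tl : List Char) (regions : List (Int × Int)) (diff : List Int)
    (hlen : diff.length = tl.length + 1)
    (hd : ∀ j, j < tl.length →
      (diff.take (j + 1)).sum = ((regions.filter (foCov j)).length : Int)) :
    ∀ (k i : Nat) (result : List Char), tl.length - i ≤ k →
      foLoopB tl diff i result result.getLast? ((diff.take i).sum) = foLoopA tl regions i result := by
  intro k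
  induction k with
  | zero =>
    intro i result hk
    have hni : ¬ i < tl.length := by omega
    rw [foLoopA, foLoopB]; simp [hni]
  | succ k ih =>
    intro i result hk
    by_cases h : i < tl.length
    · rw [foLoopA, foLoopB]
      simp only [h, dif_pos]
      have hacc : (diff.take i).sum + diff.getD i 0 = ((regions.filter (foCov i)).length : Int) := by
        rw [← sum_take_succ diff i (by omega), hd i h]
      have hcond : decide ((diff.take i).sum + diff.getD i 0 = 0) = !foIsProt regions (i : Int) := by
        rw [hacc]
        rcases Bool.eq_false_or_eq_true (foIsProt regions (i : Int)) with hp | hp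
        · rw [hp]
          have hz : ¬ (((regions.filter (foCov i)).length : Int) = 0) := by
            intro hz
            have hf := (count_zero_iff_not_prot regions i).mp hz
            rw [hp] at hf
            simp at hf
          simp only [Bool.not_true]
          exact decide_eq_false hz
        · rw [hp, (count_zero_iff_not_prot regions i).mpr hp]
          simp
      rw [show foOpsB = foOps from rfl, hcond, getLast?_none_isEmpty]
      by_cases hbr : (decide (0 < i) && foOps.contains (tl.getD i ' ') && !foIsProt regions (i : Int)) = true
      · simp only [hbr, if_pos]
        by_cases hnx : (decide (i + 1 < tl.length) && !(tl.getD (i + 1) ' ' == ' ')) = true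
        · simp only [hnx, if_pos]
          have := ih (i + 1)
            ((if !result.isEmpty && !(result.getLast? == some ' ') then result ++ [' '] else result) ++ [tl.getD i ' '] ++ [' '])
            (by omega)
          rw [← this, sum_take_succ diff i (by omega)]
          simp
        · simp only [hnx, if_neg, Bool.not_eq_true] at *
          have := ih (i + 1)
            ((if !result.isEmpty && !(result.getLast? == some ' ') then result ++ [' '] else result) ++ [tl.getD i ' '])
            (by omega)
          rw [← this, sum_take_succ diff i (by omega)]
          simp
      · simp only [Bool.not_eq_true] at hbr
        simp only [hbr, if_neg, Bool.false_eq_true, not_false_iff]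
        have := ih (i + 1) (result ++ [tl.getD i ' ']) (by omega)
        rw [← this, sum_take_succ diff i (by omega)]
        simp
    · rw [foLoopA, foLoopB]; simp [h]

-- ===== VERDICT (by name: the statement is the Claim_ definition above) =====
theorem format_operators_spec : Claim_equal_format_operators := by
  intro text regions _
  unfold Spec_format_operators format_operators format_operators_alt
  dsimp only
  set tl := text.toList
  set n := tl.length
  set diff := regions.foldl (foApplyRegion n) (List.replicate (n + 1) 0) with hdiff
  have hlen : diff.length = n + 1 := by
    rw [hdiff, foldl_applyRegion_length]; simp
  have hd : ∀ j, j < n → (diff.take (j + 1)).sum = ((regions.filter (foCov j)).length : Int) := by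
    intro j hj
    rw [hdiff, diff_prefix n j hj regions _ (by simp)]
    simp [List.take_replicate]
  have := loop_eq tl regions diff hlen hd n 0 [] (by omega)
  simp at this
  rw [this]
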